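-- pv_equiv track=rewrite | github.com/MariusPasch/Thesis-Python-Code | MCDM Creation/CriteriaCreation.py | swim
-- ===== SOURCE A (Python) =====
-- def swim(lst):
-- 	pool = ['Pool', 'Outdoor pool''Indoor pool', 'Pool with view',
--        'Shallow end in pool', 'Adult pool', 'Infinity pool',
--        'Rooftop pool', 'Plunge pool', 'Saltwater pool','Swimup bar']
-- 	beach = ['Beach', 'Private beach']
-- 	if any(x in lst for x in beach+pool) == False:
-- 		return 0
-- 	elif (any(x in lst for x in pool) and any(x in lst for x in beach)) is True:
-- 		return 2
-- 	else:
-- 		return 1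
-- ===== SOURCE B (Python) =====
-- def swim(lst):
--     pool = ['Pool', 'Outdoor pool''Indoor pool', 'Pool with view',
--             'Shallow end in pool', 'Adult pool', 'Infinity pool',
--             'Rooftop pool', 'Plunge pool', 'Saltwater pool', 'Swimup bar']
--     beach = ['Beach', 'Private beach']
--     category = {}
--     for name in pool:
--         category[name] = 0
--     for name in beach:
--         category[name] = 1
--     p = b = False
--     for item in lst:
--         c = category.get(item)
--         if c == 0:
--             p = True
--         elif c == 1:
--             b = True
--     return p + b
-- ===== Notes on version B (the rewrite author's own statement) =====
-- stated objective: alternative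
-- what changed: Transposes the traversal: instead of A's three scans over the amenity groups testing membership in lst, B builds a dict mapping each amenity name (the lists kept verbatim, including A's accidental string concatenation) to its category once, then makes a single pass over the input list setting per-category flags via dict lookup, returning the flag sum.
import Mathlib
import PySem

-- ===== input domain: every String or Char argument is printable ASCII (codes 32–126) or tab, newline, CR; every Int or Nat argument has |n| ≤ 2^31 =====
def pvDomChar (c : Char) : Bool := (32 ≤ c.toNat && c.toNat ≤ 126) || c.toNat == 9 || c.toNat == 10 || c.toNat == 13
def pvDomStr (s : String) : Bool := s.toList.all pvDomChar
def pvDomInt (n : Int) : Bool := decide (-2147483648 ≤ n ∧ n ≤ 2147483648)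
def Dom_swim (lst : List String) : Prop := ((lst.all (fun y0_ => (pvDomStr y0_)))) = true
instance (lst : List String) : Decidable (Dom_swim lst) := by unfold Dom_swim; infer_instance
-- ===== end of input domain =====

-- B replaces A's per-group membership scans and 0/1/2 branching by a dict index (amenity -> category)
-- and one pass over the input setting per-category flags (objective: alternative decomposition).

-- ===== PORT A =====
-- amenity lists verbatim from A (A's accidental concatenation "Outdoor poolIndoor pool" kept)
def pvPool : List String := ["Pool", "Outdoor poolIndoor pool", "Pool with view",
  "Shallow end in pool", "Adult pool", "Infinity pool",
  "Rooftop pool", "Plunge pool", "Saltwater pool", "Swimup bar"]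
def pvBeach : List String := ["Beach", "Private beach"]

def swim (lst : List String) : Int :=
  if ((pvBeach ++ pvPool).any (fun x => lst.contains x)) = false then 0
  else if ((pvPool.any (fun x => lst.contains x)) && (pvBeach.any (fun x => lst.contains x))) = true then 2
  else 1

-- ===== PORT B =====
-- category index: amenity name -> category number (pool = 0, beach = 1), built once
def pvCat : PySem.Dict String Int :=
  pvBeach.foldl (fun d n => d.insert n 1)
    (pvPool.foldl (fun d n => d.insert n 0) PySem.Dict.empty)

def swim_alt (lst : List String) : Int :=
  let seen := lst.foldl
    (fun (s : Bool × Bool) item =>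
      let c := pvCat.get? item
      if c == some 0 then (true, s.2)
      else if c == some 1 then (s.1, true)
      else s)
    (false, false)
  (if seen.1 then 1 else 0) + (if seen.2 then 1 else 0)

-- ===== PRECONDITION & SPEC =====
def Spec_swim (lst : List String) (out : Int) : Prop := out = swim_alt lst
instance (lst : List String) (out : Int) : Decidable (Spec_swim lst out) := by unfold Spec_swim; infer_instance

-- ===== CLAIM =====
def Claim_equal_swim : Prop := ∀ (lst : List String), Dom_swim lst → Spec_swim lst (swim lst)

-- ===== LEMMAS AND PROOFS =====

-- a fold of inserts with one constant value looks up as a membership test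
lemma get?_foldl_insert_const (l : List String) (d : PySem.Dict String Int) (v : Int) (x : String) :
    (l.foldl (fun d n => d.insert n v) d).get? x = if x ∈ l then some v else d.get? x := by
  induction l generalizing d with
  | nil => simp
  | cons a t ih =>
      simp only [List.foldl_cons, ih, PySem.Dict.get?_insert, List.mem_cons]
      by_cases hx : x ∈ t <;> by_cases ha : x = a <;> simp [hx, ha]

lemma pvCat_get (x : String) :
    pvCat.get? x = if x ∈ pvBeach then some 1 else if x ∈ pvPool then some 0 else none := by
  unfold pvCat
  rw [get?_foldl_insert_const, get?_foldl_insert_const]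
  simp [PySem.Dict.get?_empty]

-- the dict lookup recognises exactly the pool / beach names
lemma pvCat_get0 (x : String) : (pvCat.get? x == some 0) = pvPool.contains x := by
  rw [pvCat_get]
  by_cases hb : x ∈ pvBeach
  · have hp : x ∉ pvPool := by
      simp only [pvBeach, List.mem_cons, List.not_mem_nil, or_false] at hb
      rcases hb with h | h <;> subst h <;> decide
    simp [hb, hp]
  · by_cases hp : x ∈ pvPool <;> simp [hb, hp]

lemma pvCat_get1 (x : String) : (pvCat.get? x == some 1) = pvBeach.contains x := by
  rw [pvCat_get]
  by_cases hb : x ∈ pvBeach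
  · simp [hb]
  · by_cases hp : x ∈ pvPool <;> simp [hb, hp]

-- the flag loop computes the two existence tests
lemma swim_alt_fold (lst : List String) (p b : Bool) :
    lst.foldl
      (fun (s : Bool × Bool) item =>
        let c := pvCat.get? item
        if c == some 0 then (true, s.2)
        else if c == some 1 then (s.1, true)
        else s)
      (p, b)
    = (p || lst.any (fun x => pvPool.contains x), b || lst.any (fun x => pvBeach.contains x)) := by
  induction lst generalizing p b with
  | nil => simp
  | cons a t ih =>
      simp only [List.foldl_cons, List.any_cons]
      have e0 := pvCat_get0 a
      have e1 := pvCat_get1 a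
      by_cases hc0 : (pvCat.get? a == some 0) = true
      · have hget : pvCat.get? a = some 0 := by simpa using hc0
        have hpt : pvPool.contains a = true := by rw [← e0]; exact hc0
        have hbf : pvBeach.contains a = false := by rw [← e1, hget]; rfl
        simp only [hc0, if_true]
        rw [ih]
        simp_all [List.contains_eq_mem]
      · have hc0' : (pvCat.get? a == some 0) = false := by simpa using hc0
        have hpf : pvPool.contains a = false := by rw [← e0]; exact hc0'
        by_cases hc1 : (pvCat.get? a == some 1) = true
        · have hbt : pvBeach.contains a = true := by rw [← e1]; exact hc1
          simp only [hc0', Bool.false_eq_true, if_false, hc1, if_true]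
          rw [ih]
          simp_all [List.contains_eq_mem]
        · have hc1' : (pvCat.get? a == some 1) = false := by simpa using hc1
          have hbf : pvBeach.contains a = false := by rw [← e1]; exact hc1'
          simp only [hc0', hc1', Bool.false_eq_true, if_false]
          rw [ih]
          simp_all [List.contains_eq_mem]

-- membership scans transpose: any over the input vs any over the group
lemma any_contains_comm (g lst : List String) :
    lst.any (fun x => g.contains x) = g.any (fun x => lst.contains x) := by
  apply Bool.eq_iff_iff.mpr
  simp only [List.any_eq_true, List.contains_eq_mem, decide_eq_true_eq]
  exact ⟨fun ⟨x, h1, h2⟩ => ⟨x, h2, h1⟩, fun ⟨x, h1, h2⟩ => ⟨x, h2, h1⟩⟩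

-- ===== VERDICT =====
theorem swim_spec : Claim_equal_swim := by
  intro lst _
  unfold Spec_swim swim swim_alt
  rw [swim_alt_fold, any_contains_comm pvPool, any_contains_comm pvBeach]
  simp only [List.any_append, Bool.false_or]
  by_cases hp : (pvPool.any (fun x => lst.contains x)) = true <;>
    by_cases hb : (pvBeach.any (fun x => lst.contains x)) = true <;>
    simp only [hp, hb] <;> simp
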